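-- pv_equiv track=rewrite | github.com/dgr-85/DAM2 | M7/Python/ExamenUF1/Examen.py | abreujar
-- ===== SOURCE A (Python) =====
-- def abreujar(txt):
--     txt_resultant = ""
--     vocals = ('a', 'e', 'i', 'o', 'u')
--     primera = True
--
--     for lletra in txt:
--
--         if lletra.lower() in vocals and primera is False:
--             lletra = ''
--
--         if lletra.lower() in vocals and primera is True:
--             primera = False
--
--         if lletra == ' ':
--             primera = True
--
--         txt_resultant += lletra
--
--     return txt_resultant
-- ===== SOURCE B (Python) =====
-- def abreujar(txt):
--     vocals = {'a', 'e', 'i', 'o', 'u'}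
--     paraules = []
--     for paraula in txt.split(' '):
--         trossos = []
--         vista = False
--         for c in paraula:
--             if c.lower() in vocals:
--                 if not vista:
--                     trossos.append(c)
--                     vista = True
--             else:
--                 trossos.append(c)
--         paraules.append(''.join(trossos))
--     return ' '.join(paraules)
-- ===== Notes on version B (the rewrite author's own statement) =====
-- stated objective: simpler
-- what changed: Replaces A's single stateful pass (a primera flag reset on spaces, with a char-variable mutated to '') by a split-on-space / per-word first-vowel filter / rejoin decomposition.
import Mathlib
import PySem

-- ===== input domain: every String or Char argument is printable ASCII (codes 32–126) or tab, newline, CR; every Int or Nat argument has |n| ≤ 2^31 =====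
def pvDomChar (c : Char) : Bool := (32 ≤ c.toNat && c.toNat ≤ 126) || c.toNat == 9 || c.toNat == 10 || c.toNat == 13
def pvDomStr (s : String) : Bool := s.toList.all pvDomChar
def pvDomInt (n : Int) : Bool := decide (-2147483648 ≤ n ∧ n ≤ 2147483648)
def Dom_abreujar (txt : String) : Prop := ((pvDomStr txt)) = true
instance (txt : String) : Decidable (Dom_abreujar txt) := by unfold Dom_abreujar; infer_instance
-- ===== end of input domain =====

-- B replaces A's single stateful pass by split-on-' ' / per-word first-vowel keep / rejoin (simpler decomposition).

-- ===== PORT A =====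
-- A's loop: state = (txt_resultant, primera); the variable `lletra` may be mutated to the
-- EMPTY string, so it is carried as a List Char ([] = '', [c] = a one-char string).
def abreujarStep (st : List Char × Bool) (c : Char) : List Char × Bool :=
  let vocals : List (List Char) := [['a'], ['e'], ['i'], ['o'], ['u']]
  let lletra : List Char := [c]
  let lletra : List Char :=
    if PySem.Chars.lower lletra ∈ vocals ∧ st.2 = false then [] else lletra
  let primera : Bool :=
    if PySem.Chars.lower lletra ∈ vocals ∧ st.2 = true then false else st.2
  let primera : Bool := if lletra = [' '] then true else primera
  (st.1 ++ lletra, primera)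

def abreujar (txt : String) : String :=
  String.ofList (txt.toList.foldl abreujarStep ([], true)).1

-- ===== PORT B =====
def abreujarVocals : List Char := ['a', 'e', 'i', 'o', 'u']

-- B's inner loop over one word: state = (trossos, vista)
def abrWordStep (st : List Char × Bool) (c : Char) : List Char × Bool :=
  if PySem.Chars.lowerChar c ∈ abreujarVocals then
    if st.2 then st else (st.1 ++ [c], true)
  else (st.1 ++ [c], st.2)

def abrWord (w : List Char) : List Char :=
  (w.foldl abrWordStep ([], false)).1

def abreujar_alt (txt : String) : String :=
  String.ofList (PySem.Chars.join [' '] ((PySem.Chars.splitOn txt.toList [' ']).map abrWord))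

-- ===== PRECONDITION & SPEC =====
def Spec_abreujar (txt : String) (out : String) : Prop := out = abreujar_alt txt
instance (txt : String) (out : String) : Decidable (Spec_abreujar txt out) := by unfold Spec_abreujar; infer_instance

-- ===== CLAIM (what is proved, stated in full; the proofs are below) =====
def Claim_equal_abreujar : Prop := ∀ (txt : String), Dom_abreujar txt → Spec_abreujar txt (abreujar txt)

-- ===== LEMMAS AND PROOFS =====

def vowelB (c : Char) : Bool := decide (PySem.Chars.lowerChar c ∈ abreujarVocals)

-- reference semantics of A's loop (proof-only)
def specA (p : Bool) : List Char → List Char × Bool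
  | [] => ([], p)
  | c :: cs =>
    if vowelB c then
      let r := specA false cs
      (if p then c :: r.1 else r.1, r.2)
    else if c = ' ' then
      let r := specA true cs
      (c :: r.1, r.2)
    else
      let r := specA p cs
      (c :: r.1, r.2)

-- reference semantics of B's inner loop (proof-only)
def specW (s : Bool) : List Char → List Char × Bool
  | [] => ([], s)
  | c :: cs =>
    if vowelB c then
      if s then specW true cs
      else
        let r := specW true cs
        (c :: r.1, r.2)
    else
      let r := specW s cs
      (c :: r.1, r.2)

-- structural form of split on a single space (proved equal to PySem.Chars.splitOn below)
def mySplit (pre : List Char) : List Char → List (List Char)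
  | [] => [pre]
  | c :: cs => if c = ' ' then pre :: mySplit [] cs else mySplit (pre ++ [c]) cs

-- B's whole result, one pass (proof-only); t = the seen-flag inside the current word
def specR (t : Bool) : List Char → List Char
  | [] => []
  | c :: cs =>
    if c = ' ' then ' ' :: specR false cs
    else if vowelB c then (if t then specR true cs else c :: specR true cs)
    else c :: specR t cs

theorem lower_singleton (c : Char) :
    PySem.Chars.lower [c] = [PySem.Chars.lowerChar c] := by
  simp [PySem.Chars.lower]

theorem lower_in_vocals (c : Char) :
    (PySem.Chars.lower [c] ∈ ([['a'], ['e'], ['i'], ['o'], ['u']] : List (List Char)))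
      ↔ vowelB c = true := by
  simp [lower_singleton, vowelB, abreujarVocals]

theorem vowelB_space : vowelB ' ' = false := by decide

theorem stepA_vowel_true (c : Char) (acc : List Char) (hv : vowelB c = true) :
    abreujarStep (acc, true) c = (acc ++ [c], false) := by
  have hmem : PySem.Chars.lowerChar c = 'a' ∨ PySem.Chars.lowerChar c = 'e' ∨
      PySem.Chars.lowerChar c = 'i' ∨ PySem.Chars.lowerChar c = 'o' ∨
      PySem.Chars.lowerChar c = 'u' := by simpa [vowelB, abreujarVocals] using hv
  have hns : c ≠ ' ' := by intro h; rw [h] at hv; exact absurd hv (by decide)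
  rcases hmem with h | h | h | h | h <;> simp [abreujarStep, lower_singleton, h, hns]

theorem stepA_vowel_false (c : Char) (acc : List Char) (hv : vowelB c = true) :
    abreujarStep (acc, false) c = (acc, false) := by
  have hmem : PySem.Chars.lowerChar c = 'a' ∨ PySem.Chars.lowerChar c = 'e' ∨
      PySem.Chars.lowerChar c = 'i' ∨ PySem.Chars.lowerChar c = 'o' ∨
      PySem.Chars.lowerChar c = 'u' := by simpa [vowelB, abreujarVocals] using hv
  rcases hmem with h | h | h | h | h <;>
    simp [abreujarStep, h, PySem.Chars.lower]

theorem stepA_space (acc : List Char) (p : Bool) :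
    abreujarStep (acc, p) ' ' = (acc ++ [' '], true) := by
  have hm : PySem.Chars.lower [' '] ∉ ([['a'], ['e'], ['i'], ['o'], ['u']] : List (List Char)) := by
    decide
  simp [abreujarStep, hm]

theorem stepA_other (c : Char) (acc : List Char) (p : Bool)
    (hv : vowelB c = false) (hs : c ≠ ' ') :
    abreujarStep (acc, p) c = (acc ++ [c], p) := by
  have hm : PySem.Chars.lower [c] ∉ ([['a'], ['e'], ['i'], ['o'], ['u']] : List (List Char)) := by
    intro h
    rw [(lower_in_vocals c).mp h] at hv
    exact absurd hv (by simp)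
  simp [abreujarStep, hm, hs]

theorem foldlA_spec (cs : List Char) : ∀ (p : Bool) (acc : List Char),
    cs.foldl abreujarStep (acc, p) = (acc ++ (specA p cs).1, (specA p cs).2) := by
  induction cs with
  | nil => intro p acc; simp [specA]
  | cons c cs ih =>
    intro p acc
    by_cases hv : vowelB c = true
    · cases p with
      | true =>
        simp only [List.foldl_cons, stepA_vowel_true c acc hv, specA, hv, if_true]
        simp [ih]
      | false =>
        simp only [List.foldl_cons, stepA_vowel_false c acc hv, specA, hv, if_true]
        simp [ih]
    · by_cases hs : c = ' '
      · subst hs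
        simp only [List.foldl_cons, stepA_space acc p, specA, vowelB_space]
        simp [ih]
      · rw [List.foldl_cons, stepA_other c acc p (by simpa using hv) hs]
        simp only [specA, hv, hs, if_false]
        simp [ih]

theorem foldlW_spec (w : List Char) : ∀ (s : Bool) (acc : List Char),
    w.foldl abrWordStep (acc, s) = (acc ++ (specW s w).1, (specW s w).2) := by
  induction w with
  | nil => intro s acc; simp [specW]
  | cons c cs ih =>
    intro s acc
    by_cases hv : vowelB c = true
    · have hv' : PySem.Chars.lowerChar c ∈ abreujarVocals := by
        simpa [vowelB] using hv
      cases s with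
      | true => simp [abrWordStep, hv', specW, hv, ih]
      | false => simp [abrWordStep, hv', specW, hv, ih]
    · have hv' : PySem.Chars.lowerChar c ∉ abreujarVocals := by
        simpa [vowelB] using hv
      simp [abrWordStep, hv', specW, hv, ih]

theorem abrWord_eq (w : List Char) : abrWord w = (specW false w).1 := by
  simp [abrWord, foldlW_spec]

theorem specW_append (xs : List Char) : ∀ (ys : List Char) (s : Bool),
    specW s (xs ++ ys)
      = ((specW s xs).1 ++ (specW (specW s xs).2 ys).1, (specW (specW s xs).2 ys).2) := by
  induction xs with
  | nil => intro ys s; simp [specW]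
  | cons c cs ih =>
    intro ys s
    by_cases hv : vowelB c = true
    · cases s with
      | true => simp [specW, hv, ih]
      | false => simp [specW, hv, ih]
    · simp [specW, hv, ih]

theorem mySplit_ne_nil (cs : List Char) : ∀ pre, mySplit pre cs ≠ [] := by
  induction cs with
  | nil => intro pre; simp [mySplit]
  | cons c cs ih =>
    intro pre
    by_cases hs : c = ' ' <;> simp [mySplit, hs, ih]

theorem go_spec (fuel : Nat) : ∀ (l cur : List Char) (acc : List (List Char)),
    l.length < fuel →
    PySem.Chars.splitOn.go [' '] fuel l cur acc = acc.reverse ++ mySplit cur.reverse l := by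
  induction fuel with
  | zero => intro l cur acc h; omega
  | succ fuel ih =>
    intro l cur acc h
    cases l with
    | nil => simp [PySem.Chars.splitOn.go, mySplit]
    | cons c rest =>
      by_cases hs : c = ' '
      · subst hs
        have hp : ([' '] : List Char).isPrefixOf (' ' :: rest) = true := by
          simp [List.isPrefixOf]
        rw [PySem.Chars.splitOn.go]
        simp only [hp, if_true]
        rw [ih _ _ _ (by simpa using Nat.lt_of_succ_lt_succ h)]
        simp [mySplit]
      · have hp : ([' '] : List Char).isPrefixOf (c :: rest) = false := by
          simp [List.isPrefixOf]
          exact fun h => hs h.symm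
        rw [PySem.Chars.splitOn.go]
        simp only [hp, Bool.false_eq_true, if_false]
        rw [ih _ _ _ (by simpa using Nat.lt_of_succ_lt_succ h)]
        simp [mySplit, hs]

theorem splitOn_eq_mySplit (cs : List Char) :
    PySem.Chars.splitOn cs [' '] = mySplit [] cs := by
  rw [PySem.Chars.splitOn, go_spec (cs.length + 1) cs [] [] (by omega)]
  simp

theorem join_cons_of_ne_nil (x : List Char) (l : List (List Char)) (h : l ≠ []) :
    PySem.Chars.join [' '] (x :: l) = x ++ ' ' :: PySem.Chars.join [' '] l := by
  cases l with
  | nil => exact absurd rfl h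
  | cons y ys => simp [PySem.Chars.join, List.intercalate]

theorem join_map_mySplit (cs : List Char) : ∀ (pre : List Char),
    PySem.Chars.join [' '] ((mySplit pre cs).map abrWord)
      = (specW false pre).1 ++ specR (specW false pre).2 cs := by
  induction cs with
  | nil =>
    intro pre
    simp [mySplit, PySem.Chars.join, List.intercalate, abrWord_eq, specR]
  | cons c cs ih =>
    intro pre
    by_cases hs : c = ' '
    · subst hs
      have hne : (mySplit [] cs).map abrWord ≠ [] := by
        simp [mySplit_ne_nil]
      simp only [mySplit, if_true, List.map_cons]
      rw [join_cons_of_ne_nil _ _ hne, ih []]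
      simp [abrWord_eq, specW, specR]
    · simp only [mySplit, hs, if_false]
      rw [ih (pre ++ [c])]
      have hW := specW_append pre [c] false
      by_cases hv : vowelB c = true
      · cases ht : (specW false pre).2 with
        | true => simp [hW, specW, hv, ht, specR, hs]
        | false => simp [hW, specW, hv, ht, specR, hs]
      · simp [hW, specW, hv, specR, hs]

theorem specA_eq_specR (cs : List Char) : ∀ (p : Bool),
    (specA p cs).1 = specR (!p) cs := by
  induction cs with
  | nil => intro p; simp [specA, specR]
  | cons c cs ih =>
    intro p
    by_cases hv : vowelB c = true
    · have hs : c ≠ ' ' := by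
        intro h; rw [h] at hv; exact absurd hv (by decide)
      cases p with
      | true => simp [specA, specR, hv, hs, ih]
      | false => simp [specA, specR, hv, hs, ih]
    · by_cases hs : c = ' '
      · subst hs; simp [specA, specR, vowelB_space, ih]
      · simp [specA, specR, hv, hs, ih]

-- ===== VERDICT (by name: the statement is the Claim_ definition above) =====
theorem abreujar_spec : Claim_equal_abreujar := by
  intro txt _
  unfold Spec_abreujar abreujar abreujar_alt
  rw [foldlA_spec, splitOn_eq_mySplit, join_map_mySplit]
  simp [specW, specA_eq_specR]
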